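-- pv_equiv track=rewrite | github.com/hipe/tmx | script/producer_scripts/script_180920_hugo_themes/report_050_variation_in_the_phenomena.py | _bucket_by_count
-- ===== SOURCE A (Python) =====
-- def _bucket_by_count(parseds_via_normal):
--     count_buckets = {}
--     for normal, parseds in parseds_via_normal.items():
--         count = len(parseds)
--         if count in count_buckets:
--             ls = count_buckets[count]
--         else:
--             ls = []
--             count_buckets[count] = ls
--         ls.append((normal, parseds))
--
--     def ff(normal_and_parseds):
--         # display the list of phenomena be in lexcial order - sort by normal
--         return normal_and_parseds[0]
--
--     def f(lis):
--         return sorted(lis, key=ff)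
--     return {count: f(lis) for count, lis in count_buckets.items()}
-- ===== SOURCE B (Python) =====
-- def _bucket_by_count(parseds_via_normal):
--     # establish bucket keys (counts) in first-occurrence order, each starting empty
--     buckets = {len(parseds): [] for parseds in parseds_via_normal.values()}
--     # visit entries in lexical (name) order once: each bucket fills already sorted
--     for normal, parseds in sorted(parseds_via_normal.items(), key=lambda item: item[0]):
--         buckets[len(parseds)].append((normal, parseds))
--     return buckets
-- ===== Notes on version B (the rewrite author's own statement) =====
-- stated objective: alternative
-- what changed: A groups entries by count in input order and then stable-sorts every bucket by name; B pre-creates all buckets empty, sorts the entries once by name, and fills the buckets in a single pass so each bucket is born sorted and no per-bucket sort is needed.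
import Mathlib
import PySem

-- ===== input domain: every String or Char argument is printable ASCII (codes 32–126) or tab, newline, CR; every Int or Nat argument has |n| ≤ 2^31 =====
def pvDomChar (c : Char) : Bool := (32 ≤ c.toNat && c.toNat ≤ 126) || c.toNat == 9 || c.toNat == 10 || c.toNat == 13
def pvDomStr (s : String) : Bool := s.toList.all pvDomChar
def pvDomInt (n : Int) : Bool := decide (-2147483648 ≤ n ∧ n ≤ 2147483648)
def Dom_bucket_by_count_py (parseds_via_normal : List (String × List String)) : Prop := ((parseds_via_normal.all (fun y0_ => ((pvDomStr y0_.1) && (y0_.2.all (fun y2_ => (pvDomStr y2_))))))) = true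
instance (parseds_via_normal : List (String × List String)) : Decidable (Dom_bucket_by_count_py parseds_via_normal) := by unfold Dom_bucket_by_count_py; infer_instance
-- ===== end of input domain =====

-- B replaces A's group-then-sort-each-bucket with pre-initialised buckets filled by one
-- pass over the name-sorted entries (no per-bucket sort); equal keys and values proved.

-- ===== PORT A =====
-- the for-loop over .items(): count in count_buckets ? append to the aliased list : start a new bucket
def bucket_by_count_py (parseds_via_normal : List (String × List String)) : List (Int × List (String × List String)) :=
  let count_buckets :=
    parseds_via_normal.foldl
      (fun d p =>
        let count : Int := p.2.length
        if d.contains count then d.modify count [] (fun ls => ls ++ [p])  -- ls = count_buckets[count]; ls.append(...)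
        else d.insert count [p])                                          -- ls = []; count_buckets[count] = ls; ls.append(...)
      PySem.Dict.empty
  -- {count: f(lis) for count, lis in count_buckets.items()}: keys already distinct, so an order-preserving map over items (exact)
  count_buckets.items.map (fun q => (q.1, PySem.List.sorted q.2 (fun np => np.1) false))

-- ===== PORT B =====
def bucket_by_count_py_alt (parseds_via_normal : List (String × List String)) : List (Int × List (String × List String)) :=
  -- buckets = {len(parseds): [] for parseds in parseds_via_normal.values()}
  let buckets :=
    parseds_via_normal.foldl
      (fun d p => d.insert ((p.2.length : Int)) ([] : List (String × List String)))
      PySem.Dict.empty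
  -- for normal, parseds in sorted(parseds_via_normal.items(), key=...): buckets[len(parseds)].append(...)
  let buckets :=
    (PySem.List.sorted parseds_via_normal (fun p => p.1) false).foldl
      (fun d p => d.modify ((p.2.length : Int)) [] (fun ls => ls ++ [p]))
      buckets
  buckets.items

-- ===== PRECONDITION & SPEC =====
-- The assoc list stands for a Python dict, whose keys are necessarily distinct; lists with
-- duplicate names denote no dict input of A, so they are excluded (A is total on dicts).
def Pre_bucket_by_count_py (parseds_via_normal : List (String × List String)) : Prop :=
  (parseds_via_normal.map Prod.fst).Nodup
instance (parseds_via_normal : List (String × List String)) : Decidable (Pre_bucket_by_count_py parseds_via_normal) := by unfold Pre_bucket_by_count_py; infer_instance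

def pvWitness_bucket_by_count_py : (List (String × List String)) :=
  [("b", ["x", "y"]), ("a", ["z", "w"]), ("c", ["q"])]

def Spec_bucket_by_count_py (parseds_via_normal : List (String × List String)) (out : List (Int × List (String × List String))) : Prop := out = bucket_by_count_py_alt parseds_via_normal
instance (parseds_via_normal : List (String × List String)) (out : List (Int × List (String × List String))) : Decidable (Spec_bucket_by_count_py parseds_via_normal out) := by unfold Spec_bucket_by_count_py; infer_instance

-- ===== CLAIM (what is proved, stated in full; the proofs are below) =====
def Claim_equal_bucket_by_count_py : Prop := ∀ (parseds_via_normal : List (String × List String)), Dom_bucket_by_count_py parseds_via_normal → Pre_bucket_by_count_py parseds_via_normal → Spec_bucket_by_count_py parseds_via_normal (bucket_by_count_py parseds_via_normal)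

-- ===== LEMMAS AND PROOFS =====

-- abbreviations used only by the proofs
def pvCount (p : String × List String) : Int := p.2.length

-- A's grouping loop, keys: same keys as an always-modify loop
lemma foldA_keys (l : List (String × List String)) (d : PySem.Dict Int (List (String × List String))) :
    (l.foldl
      (fun d p =>
        let count : Int := p.2.length
        if d.contains count then d.modify count [] (fun ls => ls ++ [p])
        else d.insert count [p]) d).keys = (l.map pvCount).foldl PySem.Set.add d.keys := by
  induction l generalizing d with
  | nil => rfl
  | cons p t ih =>
    simp only [List.foldl_cons, List.map_cons]
    by_cases h : d.contains ((p.2.length : Int)) = true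
    · rw [if_pos h, ih]
      congr 1
      rw [PySem.Dict.keys_modify, PySem.Dict.keys_insert_of_contains _ _ h]
      simp only [PySem.Set.add, PySem.Set.contains_eq_listContains, pvCount]
      have hm : (↑p.2.length : Int) ∈ d.keys := (PySem.Dict.contains_iff_mem_keys d _).mp h
      simp [hm]
    · rw [if_neg h, ih]
      congr 1
      rw [PySem.Dict.keys_insert_of_not_contains _ _ (by simpa using h)]
      simp only [PySem.Set.add, PySem.Set.contains_eq_listContains, pvCount]
      have hm : (↑p.2.length : Int) ∉ d.keys :=
        fun hmem => h ((PySem.Dict.contains_iff_mem_keys d _).mpr hmem)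
      simp [hm]

-- A's grouping loop, values: bucket c collects the entries of count c in order
lemma foldA_getD (l : List (String × List String)) (d : PySem.Dict Int (List (String × List String))) (c : Int) :
    (l.foldl
      (fun d p =>
        let count : Int := p.2.length
        if d.contains count then d.modify count [] (fun ls => ls ++ [p])
        else d.insert count [p]) d).getD c []
      = d.getD c [] ++ l.filter (fun p => pvCount p == c) := by
  induction l generalizing d with
  | nil => simp
  | cons p t ih =>
    simp only [List.foldl_cons, List.filter_cons]
    by_cases h : d.contains ((p.2.length : Int)) = true
    · rw [if_pos h, ih, PySem.Dict.getD_modify]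
      by_cases hc : c = (p.2.length : Int)
      · simp [hc, pvCount]
      · simp [hc, pvCount, Ne.symm hc]
    · rw [if_neg h, ih, PySem.Dict.getD_insert]
      by_cases hc : c = (p.2.length : Int)
      · simp [hc, pvCount, PySem.Dict.getD_of_not_contains d _ (by simpa using h)]
      · simp [hc, pvCount, Ne.symm hc]

-- B's modify loop, values
lemma foldM_getD (l : List (String × List String)) (d : PySem.Dict Int (List (String × List String))) (c : Int) :
    (l.foldl (fun d p => d.modify ((p.2.length : Int)) [] (fun ls => ls ++ [p])) d).getD c []
      = d.getD c [] ++ l.filter (fun p => pvCount p == c) := by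
  induction l generalizing d with
  | nil => simp
  | cons p t ih =>
    simp only [List.foldl_cons, List.filter_cons]
    rw [ih, PySem.Dict.getD_modify]
    by_cases hc : c = (p.2.length : Int)
    · simp [hc, pvCount]
    · simp [hc, pvCount, Ne.symm hc]

-- B's initialisation loop: every value is []
lemma foldI_getD (l : List (String × List String)) (d : PySem.Dict Int (List (String × List String)))
    (hd : ∀ c, d.getD c [] = []) (c : Int) :
    (l.foldl (fun d p => d.insert ((p.2.length : Int)) ([] : List (String × List String))) d).getD c [] = [] := by
  induction l generalizing d with
  | nil => exact hd c
  | cons p t ih =>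
    simp only [List.foldl_cons]
    refine ih _ (fun c' => ?_)
    rw [PySem.Dict.getD_insert]
    by_cases hc : c' = (p.2.length : Int) <;> simp [hc, hd]

-- stable sort by a duplicate-free key commutes with filtering
lemma filter_sorted (xs : List (String × List String)) (P : String × List String → Bool)
    (hnd : (xs.map Prod.fst).Nodup) :
    (PySem.List.sorted xs (fun p => p.1) false).filter P
      = PySem.List.sorted (xs.filter P) (fun p => p.1) false := by
  set s := PySem.List.sorted xs (fun p => p.1) false with hs
  have hperm : (s.filter P).Perm (xs.filter P) :=
    (PySem.List.sorted_perm xs (fun p => p.1) false).filter P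
  have hle : s.Pairwise (fun a b => a.1 ≤ b.1) := PySem.List.sorted_pairwise xs (fun p => p.1)
  have hnds : (s.map Prod.fst).Nodup :=
    (hnd.perm ((PySem.List.sorted_perm xs (fun p => p.1) false).map Prod.fst).symm)
  have hne : s.Pairwise (fun a b => a.1 ≠ b.1) := List.pairwise_map.mp hnds
  have hlt : s.Pairwise (fun a b => a.1 < b.1) :=
    (hle.and hne).imp (fun h => lt_of_le_of_ne h.1 h.2)
  exact (PySem.List.sorted_eq_of_perm_of_pairwise_lt (xs.filter P) (s.filter P) (fun p => p.1)
    hperm (hlt.filter P)).symm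

lemma set_update_self (s : PySem.Set Int) (l : List Int) (h : ∀ y ∈ l, y ∈ s) :
    PySem.Set.update s l = s := by
  rw [PySem.Set.update_eq_append_filter]
  have hnil : (PySem.Set.ofList l).filter (fun y => !s.contains y) = [] := by
    rw [List.filter_eq_nil_iff]
    intro y hy
    simpa using (PySem.Set.contains_iff s y).mpr (h y ((PySem.Set.mem_ofList l y).mp hy))
  rw [hnil, List.append_nil]

-- ===== VERDICT (by name: the statement is the Claim_ definition above) =====
theorem bucket_by_count_py_spec : Claim_equal_bucket_by_count_py := by
  intro xs _hdom hpre
  simp only [Spec_bucket_by_count_py, bucket_by_count_py, bucket_by_count_py_alt]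
  set S : List Int := PySem.Set.ofList (xs.map pvCount) with hS
  -- A side
  have hAkeys : (xs.foldl
      (fun d p =>
        let count : Int := p.2.length
        if d.contains count then d.modify count [] (fun ls => ls ++ [p])
        else d.insert count [p]) PySem.Dict.empty).keys = S := by
    rw [foldA_keys, hS, PySem.Set.ofList_eq_foldl]
    rfl
  have hAnodup : (xs.foldl
      (fun d p =>
        let count : Int := p.2.length
        if d.contains count then d.modify count [] (fun ls => ls ++ [p])
        else d.insert count [p]) PySem.Dict.empty).keys.Nodup := by
    rw [hAkeys, hS]; exact PySem.Set.nodup_ofList _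
  -- B side keys
  have hmap : ((PySem.List.sorted xs (fun p => p.1) false).map pvCount).Perm (xs.map pvCount) :=
    (PySem.List.sorted_perm xs (fun p => p.1) false).map pvCount
  have hinit : (xs.foldl (fun d p => d.insert ((p.2.length : Int)) ([] : List (String × List String))) PySem.Dict.empty).keys = S := by
    rw [show (fun (d : PySem.Dict Int (List (String × List String))) (p : String × List String) => d.insert ((p.2.length : Int)) ([] : List (String × List String)))
        = (fun d p => d.insert (pvCount p) []) from rfl]
    rw [PySem.Dict.keys_foldl_insert_key _ pvCount (fun _ _ => []), hS, PySem.Set.ofList_eq_foldl]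
    rfl
  have hBkeys : ((PySem.List.sorted xs (fun p => p.1) false).foldl
      (fun d p => d.modify ((p.2.length : Int)) [] (fun ls => ls ++ [p]))
      (xs.foldl (fun d p => d.insert ((p.2.length : Int)) ([] : List (String × List String))) PySem.Dict.empty)).keys = S := by
    rw [show (fun (d : PySem.Dict Int (List (String × List String))) (p : String × List String) => d.modify ((p.2.length : Int)) [] (fun ls => ls ++ [p]))
        = (fun d p => d.modify (pvCount p) [] (fun ls => ls ++ [p])) from rfl]
    rw [PySem.Dict.keys_foldl_modify_key _ pvCount [] (fun _ p ls => ls ++ [p]), hinit]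
    exact set_update_self _ _ (fun y hy => by
      rw [hS]
      exact (PySem.Set.mem_ofList _ y).mpr (hmap.mem_iff.mp hy))
  have hBnodup : ((PySem.List.sorted xs (fun p => p.1) false).foldl
      (fun d p => d.modify ((p.2.length : Int)) [] (fun ls => ls ++ [p]))
      (xs.foldl (fun d p => d.insert ((p.2.length : Int)) ([] : List (String × List String))) PySem.Dict.empty)).keys.Nodup := by
    rw [hBkeys, hS]; exact PySem.Set.nodup_ofList _
  rw [PySem.Dict.items_eq_map_keys _ hAnodup [], PySem.Dict.items_eq_map_keys _ hBnodup []]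
  rw [hAkeys, hBkeys, List.map_map]
  refine List.map_congr_left (fun c _hc => ?_)
  simp only [Function.comp]
  rw [foldA_getD, foldM_getD, foldI_getD _ _ (fun c => rfl) c]
  simp only [PySem.Dict.getD_empty, List.nil_append]
  congr 1
  rw [filter_sorted xs (fun p => pvCount p == c) hpre]
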